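-- pv_equiv track=rewrite | github.com/max-f/advent-of-code | 2024/d09.py | find_free_block
-- ===== SOURCE A (Python) =====
-- def find_free_block(disk, required_length):
--     current_length = 0
--     for i, val in enumerate(disk):
--         if val == '.':
--             current_length += 1
--             if current_length >= required_length:
--                 return i - required_length + 1
--         else:
--             current_length = 0
--     return -1
-- ===== SOURCE B (Python) =====
-- def find_free_block(disk, required_length):
--     # Run-length encode the disk, then scan the runs for a long-enough '.' run.
--     runs = []
--     for val in disk:
--         if runs and runs[-1][0] == val:
--             runs[-1][1] += 1
--         else:
--             runs.append([val, 1])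
--     idx = 0
--     for val, run_len in runs:
--         if val == '.' and run_len >= required_length:
--             return idx
--         idx += run_len
--     return -1
-- ===== Notes on version B (the rewrite author's own statement) =====
-- stated objective: alternative
-- what changed: B run-length-encodes the disk into (value, run length) runs and then scans the runs with a running start offset, returning the start of the first '.' run of sufficient length, instead of A's single per-element scan with a consecutive-dot counter.
-- intended difference: On inputs with required_length <= 0 and at least one '.' element, A returns first_dot_index - required_length + 1 (its >= check only fires after the first increment, an off-by-one artefact), while B returns the start of the first '.' run, the intended 'first free block' position for a trivially satisfiable length. — e.g. on find_free_block(["."], 0): A returns 1, B returns 0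
import Mathlib
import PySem

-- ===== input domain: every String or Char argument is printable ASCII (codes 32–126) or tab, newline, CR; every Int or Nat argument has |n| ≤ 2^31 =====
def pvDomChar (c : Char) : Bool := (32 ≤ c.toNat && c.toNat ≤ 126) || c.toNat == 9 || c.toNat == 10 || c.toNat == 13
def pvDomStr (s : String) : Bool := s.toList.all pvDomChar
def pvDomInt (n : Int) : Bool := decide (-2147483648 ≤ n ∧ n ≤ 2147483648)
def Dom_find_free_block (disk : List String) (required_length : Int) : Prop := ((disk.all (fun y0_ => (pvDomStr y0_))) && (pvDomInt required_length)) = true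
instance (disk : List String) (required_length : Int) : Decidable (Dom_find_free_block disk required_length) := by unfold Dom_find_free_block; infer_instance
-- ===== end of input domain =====

-- B run-length-encodes the disk and scans the runs instead of A's per-element counter scan
-- (alternative decomposition, same cost); for required_length ≤ 0 with a '.' present B returns
-- the run start rather than A's off-by-one offset (see D_ below).

-- ===== PORT A =====
-- A's loop: i is the enumerate index, cur the consecutive-'.' counter (incremented before the >= test).
def pvGoA (rl : Int) : List String → Int → Int → Int
  | [], _, _ => -1
  | val :: rest, i, cur =>
    if val = "." then
      if cur + 1 ≥ rl then i - rl + 1 else pvGoA rl rest (i + 1) (cur + 1)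
    else pvGoA rl rest (i + 1) 0

def find_free_block (disk : List String) (required_length : Int) : Int :=
  pvGoA required_length disk 0 0

-- ===== PORT B =====
-- B phase 1: run-length encoding; the Python appends / bumps runs[-1], ported as the
-- same left fold keeping the runs list in reverse order, reversed at the end.
def pvBuild (disk : List String) : List (String × Int) :=
  (disk.foldl (fun racc val =>
    match racc with
    | (v, c) :: rs => if v = val then (v, c + 1) :: rs else (val, 1) :: (v, c) :: rs
    | [] => [(val, 1)]) []).reverse

-- B phase 2: scan the runs with a running start offset idx.
def pvScan (rl : Int) : List (String × Int) → Int → Int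
  | [], _ => -1
  | (val, c) :: rest, idx =>
    if val = "." ∧ c ≥ rl then idx
    else pvScan rl rest (idx + c)

def find_free_block_alt (disk : List String) (required_length : Int) : Int :=
  pvScan required_length (pvBuild disk) 0

-- ===== PRECONDITION & SPEC =====
-- On inputs with required_length ≤ 0 and a '.' element, A returns first_dot_index - required_length + 1
-- (its >= check only fires after the first increment, an off-by-one artefact), while B returns the start
-- of the first '.' run — the intended 'first free block' position for a trivially satisfiable length.
def D_find_free_block (disk : List String) (required_length : Int) : Prop :=
  required_length ≤ 0 ∧ "." ∈ disk
instance (disk : List String) (required_length : Int) : Decidable (D_find_free_block disk required_length) := by unfold D_find_free_block; infer_instance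

def Spec_find_free_block (disk : List String) (required_length : Int) (out : Int) : Prop :=
  ¬ D_find_free_block disk required_length → out = find_free_block_alt disk required_length
instance (disk : List String) (required_length : Int) (out : Int) : Decidable (Spec_find_free_block disk required_length out) := by unfold Spec_find_free_block; infer_instance

def pvDiffWitness_find_free_block : List String × Int := (["."], 0)
def pvDiffWitnessOut_find_free_block : Int × Int := (1, 0)

-- ===== CLAIM (what is proved, stated in full; the proofs are below) =====
def Claim_unchanged_find_free_block : Prop := ∀ (disk : List String) (required_length : Int), Dom_find_free_block disk required_length → Spec_find_free_block disk required_length (find_free_block disk required_length)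
def Claim_changed_find_free_block : Prop := Dom_find_free_block (pvDiffWitness_find_free_block.1) (pvDiffWitness_find_free_block.2) ∧ D_find_free_block (pvDiffWitness_find_free_block.1) (pvDiffWitness_find_free_block.2) ∧ find_free_block (pvDiffWitness_find_free_block.1) (pvDiffWitness_find_free_block.2) = pvDiffWitnessOut_find_free_block.1 ∧ find_free_block_alt (pvDiffWitness_find_free_block.1) (pvDiffWitness_find_free_block.2) = pvDiffWitnessOut_find_free_block.2 ∧ pvDiffWitnessOut_find_free_block.1 ≠ pvDiffWitnessOut_find_free_block.2
def Claim_exact_find_free_block : Prop := ∀ (disk : List String) (required_length : Int), Dom_find_free_block disk required_length → D_find_free_block disk required_length → find_free_block disk required_length ≠ find_free_block_alt disk required_length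

-- ===== LEMMAS AND PROOFS =====

lemma pvGoA_cons (rl : Int) (val : String) (rest : List String) (i cur : Int) :
    pvGoA rl (val :: rest) i cur =
      if val = "." then
        if cur + 1 ≥ rl then i - rl + 1 else pvGoA rl rest (i + 1) (cur + 1)
      else pvGoA rl rest (i + 1) 0 := rfl

lemma pvScan_cons (rl : Int) (val : String) (c : Int) (rest : List (String × Int)) (idx : Int) :
    pvScan rl ((val, c) :: rest) idx =
      if val = "." ∧ c ≥ rl then idx else pvScan rl rest (idx + c) := rfl

-- Front-recursive run-length encoding, used only in the proofs.
def pvCombine (p : String × Int) (rs : List (String × Int)) : List (String × Int) :=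
  match p, rs with
  | (v, c), (w, d) :: rs' => if w = v then (v, c + d) :: rs' else (v, c) :: (w, d) :: rs'
  | (v, c), [] => [(v, c)]

def pvRunsF : List String → List (String × Int)
  | [] => []
  | v :: rest => pvCombine (v, 1) (pvRunsF rest)

lemma pvCombine_head (x : String) (e : Int) (l : List (String × Int)) :
    ∃ d rs', pvCombine (x, e) l = (x, d) :: rs' := by
  rcases l with _ | ⟨⟨w, d⟩, rs'⟩
  · exact ⟨e, [], rfl⟩
  · by_cases hwx : w = x
    · exact ⟨e + d, rs', by simp [pvCombine, hwx]⟩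
    · exact ⟨e, (w, d) :: rs', by simp [pvCombine, hwx]⟩

lemma pvFoldl_char : ∀ (l : List String) (v : String) (c : Int) (rs : List (String × Int)),
    l.foldl (fun racc val =>
      match racc with
      | (v, c) :: rs => if v = val then (v, c + 1) :: rs else (val, 1) :: (v, c) :: rs
      | [] => [(val, 1)]) ((v, c) :: rs)
    = (pvCombine (v, c) (pvRunsF l)).reverse ++ rs := by
  intro l
  induction l with
  | nil => intro v c rs; simp [pvRunsF, pvCombine]
  | cons x t ih =>
    intro v c rs
    simp only [List.foldl_cons]
    by_cases hvx : v = x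
    · subst hvx
      rw [if_pos rfl]
      rw [ih]
      rcases ht : pvRunsF t with _ | ⟨⟨w, d⟩, rs'⟩
      · simp [pvRunsF, ht, pvCombine]
      · by_cases hwv : w = v
        · subst hwv
          simp only [pvRunsF, ht, pvCombine]
          refine congrArg (· ++ rs) (congrArg List.reverse ?_)
          simp
          ring
        · simp [pvRunsF, ht, pvCombine, hwv]
    · rw [if_neg hvx]
      rw [ih]
      obtain ⟨d, rs', hc⟩ := pvCombine_head x 1 (pvRunsF t)
      have hstep : pvRunsF (x :: t) = (x, d) :: rs' := by rw [pvRunsF, hc]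
      rw [hstep]
      have hxv : ¬ (x = v) := fun h => hvx h.symm
      have h1 : pvCombine (v, c) ((x, d) :: rs') = (v, c) :: (x, d) :: rs' := by
        simp [pvCombine, hxv]
      rw [h1, hc]
      simp

lemma pvBuild_eq (disk : List String) : pvBuild disk = pvRunsF disk := by
  cases disk with
  | nil => rfl
  | cons x t =>
    show (List.foldl _ [(x, 1)] t).reverse = _
    rw [pvFoldl_char t x 1 []]
    simp [pvRunsF]

-- A over a run of k dots that is long enough (rl ≥ 1): fires at the rl-th dot, giving the run start.
lemma pvA_fire : ∀ (k : ℕ) (rest : List String) (idx cur rl : Int), 1 ≤ k → rl ≤ cur + k → 0 ≤ cur →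
    1 ≤ rl → pvGoA rl (List.replicate k "." ++ rest) idx cur = idx + max (rl - cur) 1 - rl := by
  intro k
  induction k with
  | zero => omega
  | succ k ih =>
    intro rest idx cur rl _ hle hcur hrl
    rw [List.replicate_succ, List.cons_append, pvGoA_cons, if_pos rfl]
    by_cases hf : cur + 1 ≥ rl
    · rw [if_pos hf]
      have h1 : max (rl - cur) 1 = 1 := by omega
      rw [h1]; ring
    · rw [if_neg hf]
      rcases Nat.eq_zero_or_pos k with hk | hk
      · subst hk; push_cast at hle; omega
      · rw [ih rest (idx + 1) (cur + 1) rl hk (by push_cast at hle ⊢; omega) (by omega) hrl]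
        have h1 : max (rl - (cur + 1)) 1 = rl - cur - 1 := by omega
        have h2 : max (rl - cur) 1 = rl - cur := by omega
        rw [h1, h2]; ring

-- A over a run of k dots that is too short: walks through, counter grows by k.
lemma pvA_nofire : ∀ (k : ℕ) (rest : List String) (idx cur rl : Int), cur + k < rl →
    pvGoA rl (List.replicate k "." ++ rest) idx cur = pvGoA rl rest (idx + k) (cur + k) := by
  intro k
  induction k with
  | zero => intro rest idx cur rl _; simp
  | succ k ih =>
    intro rest idx cur rl hlt
    rw [List.replicate_succ, List.cons_append, pvGoA_cons, if_pos rfl]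
    rw [if_neg (by push_cast at hlt; omega)]
    rw [ih rest (idx + 1) (cur + 1) rl (by push_cast at hlt ⊢; omega)]
    congr 1 <;> push_cast <;> ring

-- A over a run of k ≥ 1 non-dot values: counter resets, position advances by k.
lemma pvA_skip : ∀ (k : ℕ) (v : String) (rest : List String) (idx cur rl : Int), 1 ≤ k → v ≠ "." →
    pvGoA rl (List.replicate k v ++ rest) idx cur = pvGoA rl rest (idx + k) 0 := by
  intro k
  induction k with
  | zero => omega
  | succ k ih =>
    intro v rest idx cur rl _ hv
    rw [List.replicate_succ, List.cons_append, pvGoA_cons, if_neg hv]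
    rcases Nat.eq_zero_or_pos k with hk | hk
    · subst hk; simp
    · rw [ih v rest (idx + 1) 0 rl hk hv]
      congr 1; push_cast; ring

lemma pvCombine_ne_nil (p : String × Int) (rs : List (String × Int)) : pvCombine p rs ≠ [] := by
  rcases p with ⟨v, c⟩
  obtain ⟨d, rs', hc⟩ := pvCombine_head v c rs
  rw [hc]; simp

lemma pvRunsF_nil : ∀ (disk : List String), pvRunsF disk = [] → disk = [] := by
  intro disk h
  cases disk with
  | nil => rfl
  | cons x t => exact absurd h (pvCombine_ne_nil (x, 1) (pvRunsF t))

lemma pvRunsF_decomp : ∀ (disk : List String) (v : String) (c : Int) (rs : List (String × Int)),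
    pvRunsF disk = (v, c) :: rs →
    ∃ (k : ℕ) (disk' : List String), c = (k : Int) ∧ 1 ≤ k ∧
      disk = List.replicate k v ++ disk' ∧ pvRunsF disk' = rs ∧
      ∀ w t, disk' = w :: t → w ≠ v := by
  intro disk
  induction disk with
  | nil => intro v c rs h; simp [pvRunsF] at h
  | cons x t ih =>
    intro v c rs h
    rw [pvRunsF] at h
    rcases ht : pvRunsF t with _ | ⟨⟨w, d⟩, rs'⟩
    · rw [ht] at h
      have hnil : t = [] := pvRunsF_nil t ht
      simp only [pvCombine, List.cons.injEq, Prod.mk.injEq] at h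
      obtain ⟨⟨hxv, hc⟩, hrs⟩ := h
      subst hnil
      refine ⟨1, [], by omega, Nat.le_refl 1, by simp [hxv], by simp [pvRunsF, hrs], by simp⟩
    · rw [ht] at h
      simp only [pvCombine] at h
      obtain ⟨k', t', hd, hk', hteq, hrt', hhead⟩ := ih w d rs' ht
      by_cases hwx : w = x
      · rw [if_pos hwx] at h
        simp only [List.cons.injEq, Prod.mk.injEq] at h
        obtain ⟨⟨hv, hc⟩, hrs⟩ := h
        subst hv hwx
        refine ⟨k' + 1, t', by push_cast; omega, by omega, ?_, by rw [hrt', hrs], ?_⟩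
        · rw [List.replicate_succ, List.cons_append, hteq]
        · exact hhead
      · rw [if_neg hwx] at h
        simp only [List.cons.injEq, Prod.mk.injEq] at h
        obtain ⟨⟨hv, hc⟩, hrs⟩ := h
        subst hv
        refine ⟨1, t, by omega, Nat.le_refl 1, by simp, by rw [ht, hrs], ?_⟩
        intro w2 t2 ht2
        rw [ht2] at hteq
        rcases Nat.exists_eq_add_of_le hk' with ⟨m, hm⟩
        subst hm
        rw [Nat.add_comm, List.replicate_succ, List.cons_append, List.cons.injEq] at hteq
        rw [hteq.1]
        exact fun hcontra => hwx hcontra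

-- Main bridge outside D_: A's scan with counter 0 equals B's scan over the runs.
lemma pvMain : ∀ (rsn : List (String × Int)) (disk : List String) (idx rl : Int),
    pvRunsF disk = rsn → (1 ≤ rl ∨ "." ∉ disk) →
    pvGoA rl disk idx 0 = pvScan rl rsn idx := by
  intro rsn
  induction rsn with
  | nil =>
    intro disk idx rl h _
    rw [pvRunsF_nil disk h]
    rfl
  | cons p rs ih =>
    rcases p with ⟨v, c⟩
    intro disk idx rl h hside
    obtain ⟨k, disk', hc, hk, hdisk, hrs', hhead⟩ := pvRunsF_decomp disk v c rs h
    subst hdisk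
    have hside' : 1 ≤ rl ∨ "." ∉ disk' := by
      rcases hside with h1 | h2
      · exact Or.inl h1
      · exact Or.inr (fun hm => h2 (List.mem_append_right _ hm))
    rw [pvScan_cons]
    by_cases hv : v = "."
    · subst hv
      have hrl : 1 ≤ rl := by
        rcases hside with h1 | h2
        · exact h1
        · exact absurd (List.mem_append_left _ (by
            rcases Nat.exists_eq_add_of_le hk with ⟨m, hm⟩
            subst hm
            rw [Nat.add_comm, List.replicate_succ]
            exact List.mem_cons_self)) h2
      by_cases hge : c ≥ rl
      · rw [pvA_fire k disk' idx 0 rl hk (by omega) le_rfl hrl]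
        rw [if_pos ⟨rfl, hge⟩]
        have h1 : max (rl - 0) 1 = rl := by omega
        rw [h1]; ring
      · rw [pvA_nofire k disk' idx 0 rl (by omega)]
        rw [if_neg (by tauto)]
        have hres : pvGoA rl disk' (idx + k) (0 + k) = pvGoA rl disk' (idx + k) 0 := by
          rcases disk' with _ | ⟨w, t⟩
          · rfl
          · have hw : w ≠ "." := hhead w t rfl
            rw [pvGoA_cons, pvGoA_cons, if_neg hw, if_neg hw]
        rw [hres, ih disk' (idx + k) rl hrs' hside']
        congr 1; omega
    · rw [pvA_skip k v disk' idx 0 rl hk hv]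
      rw [if_neg (by tauto)]
      rw [ih disk' (idx + k) rl hrs' hside']
      congr 1; omega

-- Index of the first "." (as an Int), defined for the D_ analysis.
def pvFd : List String → Int
  | [] => 0
  | v :: t => if v = "." then 0 else pvFd t + 1

-- A inside D_: fires at the very first dot, returning idx + firstdot - rl + 1.
lemma pvA_neg : ∀ (disk : List String) (idx cur rl : Int), rl ≤ 0 → 0 ≤ cur → "." ∈ disk →
    pvGoA rl disk idx cur = idx + pvFd disk - rl + 1 := by
  intro disk
  induction disk with
  | nil => intro _ _ _ _ _ hm; simp at hm
  | cons v t ih =>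
    intro idx cur rl hrl hcur hm
    rw [pvGoA_cons]
    by_cases hv : v = "."
    · rw [if_pos hv, if_pos (by omega)]
      simp [pvFd, hv]
    · rw [if_neg hv]
      have hmt : "." ∈ t := by
        rcases List.mem_cons.mp hm with h1 | h1
        · exact absurd h1.symm hv
        · exact h1
      rw [ih (idx + 1) 0 rl hrl le_rfl hmt]
      simp [pvFd, hv]
      ring

lemma pvFd_replicate : ∀ (k : ℕ) (v : String) (d : List String), v ≠ "." →
    pvFd (List.replicate k v ++ d) = k + pvFd d := by
  intro k
  induction k with
  | zero => intro v d _; simp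
  | succ k ih =>
    intro v d hv
    rw [List.replicate_succ, List.cons_append]
    simp only [pvFd, if_neg hv, ih v d hv]
    push_cast; ring

-- B inside D_: the first dot run fires (its length ≥ 1 > rl), returning its start = first dot index.
lemma pvScan_neg : ∀ (rsn : List (String × Int)) (disk : List String) (idx rl : Int),
    pvRunsF disk = rsn → rl ≤ 0 → "." ∈ disk →
    pvScan rl rsn idx = idx + pvFd disk := by
  intro rsn
  induction rsn with
  | nil =>
    intro disk idx rl h _ hm
    rw [pvRunsF_nil disk h] at hm
    simp at hm
  | cons p rs ih =>
    rcases p with ⟨v, c⟩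
    intro disk idx rl h hrl hm
    obtain ⟨k, disk', hc, hk, hdisk, hrs', _⟩ := pvRunsF_decomp disk v c rs h
    subst hdisk
    rw [pvScan_cons]
    by_cases hv : v = "."
    · subst hv
      rw [if_pos ⟨rfl, by omega⟩]
      rcases Nat.exists_eq_add_of_le hk with ⟨m, hm'⟩
      subst hm'
      rw [Nat.add_comm, List.replicate_succ, List.cons_append]
      simp [pvFd]
    · rw [if_neg (by tauto)]
      have hmt : "." ∈ disk' := by
        rcases List.mem_append.mp hm with h1 | h1
        · exact absurd (List.eq_of_mem_replicate h1).symm hv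
        · exact h1
      rw [ih disk' (idx + c) rl hrs' hrl hmt]
      rw [pvFd_replicate k v disk' hv]
      omega

-- ===== VERDICT (by name: the statements are the Claim_ definitions above) =====
theorem find_free_block_spec : Claim_unchanged_find_free_block := by
  intro disk rl _
  unfold Spec_find_free_block D_find_free_block
  intro hnD
  unfold find_free_block find_free_block_alt
  rw [pvBuild_eq]
  have hside : 1 ≤ rl ∨ "." ∉ disk := by
    by_cases h1 : 1 ≤ rl
    · exact Or.inl h1
    · exact Or.inr (fun hm => hnD ⟨by omega, hm⟩)
  exact pvMain (pvRunsF disk) disk 0 rl rfl hside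

theorem find_free_block_changed : Claim_changed_find_free_block := by
  unfold Claim_changed_find_free_block; decide

theorem find_free_block_tight : Claim_exact_find_free_block := by
  intro disk rl _ hD
  obtain ⟨hrl, hm⟩ := hD
  unfold find_free_block find_free_block_alt
  rw [pvBuild_eq]
  rw [pvA_neg disk 0 0 rl hrl le_rfl hm]
  rw [pvScan_neg (pvRunsF disk) disk 0 rl rfl hrl hm]
  omega
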